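-- pv_equiv track=rewrite | github.com/vishnunp96/gaml-rep | preprocessing/latexmlpy.py | spaniter
-- ===== SOURCE A (Python) =====
-- def positer(s,char):
-- 	next = s.find(char)
-- 	while next != -1:
-- 		yield next
-- 		next = s.find(char,next+1)
--
-- def spaniter(s,delimiter):
-- 	breaks = [i for i in positer(s,delimiter)]
-- 	if breaks:
-- 		yield 0,breaks[0]
-- 		for i in range(0,len(breaks)-1):
-- 			yield breaks[i]+1,breaks[i+1]
-- 		yield breaks[-1]+1,len(s)
-- 	else:
-- 		yield 0,len(s)
-- ===== SOURCE B (Python) =====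
-- def spaniter(s, delimiter):
-- 	start = 0
-- 	pos = s.find(delimiter)
-- 	while pos != -1:
-- 		yield start, pos
-- 		start = pos + 1
-- 		pos = s.find(delimiter, start)
-- 	yield start, len(s)
-- ===== Notes on version B (the rewrite author's own statement) =====
-- stated objective: simpler
-- what changed: Inlined the position generator into one streaming pass that keeps a running start index and yields each span as it finds the next delimiter, removing the materialized breaks list, the range-based pairwise loop and the empty/nonempty branch.
import Mathlib
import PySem

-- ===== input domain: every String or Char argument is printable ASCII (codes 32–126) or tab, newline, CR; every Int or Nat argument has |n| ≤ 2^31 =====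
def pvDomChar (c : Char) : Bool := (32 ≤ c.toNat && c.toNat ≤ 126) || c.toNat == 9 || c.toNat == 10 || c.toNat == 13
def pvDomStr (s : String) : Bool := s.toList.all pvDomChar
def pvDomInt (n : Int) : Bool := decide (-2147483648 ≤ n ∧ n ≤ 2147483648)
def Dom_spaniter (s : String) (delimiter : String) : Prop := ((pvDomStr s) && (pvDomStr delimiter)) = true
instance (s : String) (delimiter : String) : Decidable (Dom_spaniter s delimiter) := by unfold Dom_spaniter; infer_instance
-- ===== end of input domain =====

-- B inlines A's position generator into one streaming pass with a running start index ('simpler' objective); return values proved equal.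


-- ===== PORT A =====
-- positer: while-loop over successive s.find results, fuel = |s|+1 bounds the number of
-- yields (positions strictly increase and lie in [0,|s|]), so the fuel never runs out.
def positerGo (s delimiter : String) (start : Int) (fuel : Nat) : List Int :=
  match fuel with
  | 0 => []
  | Nat.succ fuel =>
    let next := PySem.Str.findFrom s delimiter start none
    if next = -1 then [] else next :: positerGo s delimiter (next + 1) fuel

def spaniter (s : String) (delimiter : String) : List (Int × Int) :=
  let breaks := positerGo s delimiter 0 (s.toList.length + 1)
  if breaks = [] then
    [(0, PySem.Str.len s)]
  else
    (0, PySem.List.pyGetD breaks 0 0)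
      :: ((PySem.List.pyRange 0 (PySem.List.len breaks - 1) 1).map
            (fun i => (PySem.List.pyGetD breaks i 0 + 1, PySem.List.pyGetD breaks (i + 1) 0)))
      ++ [(PySem.List.pyGetD breaks (-1) 0 + 1, PySem.Str.len s)]

-- ===== PORT B =====
-- single streaming while-loop: state (start, pos); same fuel bound as above.
def spanGo (s delimiter : String) (start pos : Int) (fuel : Nat) : List (Int × Int) :=
  match fuel with
  | 0 => [(start, PySem.Str.len s)]
  | Nat.succ fuel =>
    if pos = -1 then [(start, PySem.Str.len s)]
    else (start, pos) :: spanGo s delimiter (pos + 1) (PySem.Str.findFrom s delimiter (pos + 1) none) fuel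

def spaniter_alt (s : String) (delimiter : String) : List (Int × Int) :=
  spanGo s delimiter 0 (PySem.Str.findFrom s delimiter 0 none) (s.toList.length + 1)

-- ===== PRECONDITION & SPEC =====
def Spec_spaniter (s : String) (delimiter : String) (out : List (Int × Int)) : Prop := out = spaniter_alt s delimiter
instance (s : String) (delimiter : String) (out : List (Int × Int)) : Decidable (Spec_spaniter s delimiter out) := by unfold Spec_spaniter; infer_instance

-- ===== CLAIM (what is proved, stated in full; the proofs are below) =====
def Claim_equal_spaniter : Prop := ∀ (s : String) (delimiter : String), Dom_spaniter s delimiter → Spec_spaniter s delimiter (spaniter s delimiter)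

-- ===== LEMMAS AND PROOFS =====

-- the common shape of both results: spans starting at `start` between the breaks in `bs`, ending at `L`
def assembleSpans (start : Int) (bs : List Int) (L : Int) : List (Int × Int) :=
  match bs with
  | [] => [(start, L)]
  | b :: bs => (start, b) :: assembleSpans (b + 1) bs L

theorem spanGo_eq (s d : String) :
    ∀ (fuel : Nat) (start from_ : Int),
      spanGo s d start (PySem.Str.findFrom s d from_ none) fuel
        = assembleSpans start (positerGo s d from_ fuel) (PySem.Str.len s) := by
  intro fuel
  induction fuel with
  | zero => intro start from_; simp [spanGo, positerGo, assembleSpans]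
  | succ fuel ih =>
    intro start from_
    simp only [spanGo, positerGo]
    by_cases h : PySem.Chars.findFrom s.toList d.toList from_ none = -1
    · simp [PySem.Str.findFrom_eq, h, assembleSpans]
    · simp only [PySem.Str.findFrom_eq, h, if_false, assembleSpans]
      have := ih (PySem.Chars.findFrom s.toList d.toList from_ none + 1)
              (PySem.Chars.findFrom s.toList d.toList from_ none + 1)
      simp only [PySem.Str.findFrom_eq] at this
      rw [this]

-- reindexing: a map over range(1, n+1) is a map over range(0, n) of the shifted function
theorem map_pyRange_succ {α : Type} (f : Int → α) (n : Nat) :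
    (PySem.List.pyRange 1 ((n : Int) + 1) 1).map f
      = (PySem.List.pyRange 0 (n : Int) 1).map (fun i => f (i + 1)) := by
  rw [PySem.List.pyRange_one, PySem.List.pyRange_one]
  have h1 : (((n : Int) + 1) - 1).toNat = n := by omega
  have h2 : ((n : Int) - 0).toNat = n := by omega
  rw [h1, h2, List.map_map, List.map_map]
  apply List.map_congr_left
  intro k _
  simp [Function.comp]
  ring_nf

theorem assembleA_eq (L : Int) :
    ∀ (bs : List Int) (b start : Int),
      (start, PySem.List.pyGetD (b :: bs) 0 0)
          :: ((PySem.List.pyRange 0 (PySem.List.len (b :: bs) - 1) 1).map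
                (fun i => (PySem.List.pyGetD (b :: bs) i 0 + 1, PySem.List.pyGetD (b :: bs) (i + 1) 0)))
          ++ [(PySem.List.pyGetD (b :: bs) (-1) 0 + 1, L)]
        = assembleSpans start (b :: bs) L := by
  intro bs
  induction bs with
  | nil =>
    intro b start
    have hr : PySem.List.len ([b] : List Int) - 1 = 0 := by simp [PySem.List.len_eq]
    rw [hr, PySem.List.pyRange_one_eq_nil le_rfl, List.map_nil,
        PySem.List.pyGetD_neg_one ([b] : List Int) 0 (by simp)]
    simp [assembleSpans, PySem.List.pyGetD_zero_cons]
  | cons b' bs' ih =>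
    intro b start
    have hget : ∀ (i : Int), 0 ≤ i →
        PySem.List.pyGetD (b :: b' :: bs') (i + 1) 0 = PySem.List.pyGetD (b' :: bs') i 0 := by
      intro i hi
      obtain ⟨n, rfl⟩ := Int.eq_ofNat_of_zero_le hi
      have hc : (n : Int) + 1 = ((n + 1 : Nat) : Int) := by push_cast; ring
      rw [hc, PySem.List.pyGetD_natCast, PySem.List.pyGetD_natCast, List.getD_cons_succ]
    have hlen : PySem.List.len (b :: b' :: bs') - 1 = (bs'.length : Int) + 1 := by
      simp [PySem.List.len_eq]
    rw [hlen, PySem.List.pyRange_one_cons (by positivity), List.map_cons]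
    have h01 : (0 : Int) + 1 = 1 := by ring
    rw [h01, map_pyRange_succ]
    have hmap : ((PySem.List.pyRange 0 (bs'.length : Int) 1).map
          (fun i => (PySem.List.pyGetD (b :: b' :: bs') (i + 1) 0 + 1,
                     PySem.List.pyGetD (b :: b' :: bs') (i + 1 + 1) 0)))
        = (PySem.List.pyRange 0 (bs'.length : Int) 1).map
            (fun i => (PySem.List.pyGetD (b' :: bs') i 0 + 1, PySem.List.pyGetD (b' :: bs') (i + 1) 0)) := by
      apply List.map_congr_left
      intro i hi
      have h0 : 0 ≤ i := ((PySem.List.mem_pyRange_one).mp hi).1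
      rw [hget i h0, hget (i + 1) (by omega)]
    rw [hmap]
    have hneg : PySem.List.pyGetD (b :: b' :: bs') (-1) 0 = PySem.List.pyGetD (b' :: bs') (-1) 0 := by
      rw [PySem.List.pyGetD_neg_one _ 0 (by simp), PySem.List.pyGetD_neg_one _ 0 (by simp)]
      simp [List.getLast_cons]
    rw [hneg]
    have head0 : PySem.List.pyGetD (b :: b' :: bs') 0 0 = b := PySem.List.pyGetD_zero_cons ..
    have head1 : PySem.List.pyGetD (b :: b' :: bs') 1 0 = b' := by
      have h := hget 0 le_rfl
      rw [h01] at h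
      rw [h]; exact PySem.List.pyGetD_zero_cons ..
    rw [head0, head1]
    show (start, b) :: ((b + 1, b') :: _ ++ _) = _
    rw [assembleSpans]
    congr 1
    have hih := ih b' (b + 1)
    have hlen' : PySem.List.len (b' :: bs') - 1 = (bs'.length : Int) := by
      simp [PySem.List.len_eq]
    rw [hlen'] at hih
    rw [← hih]
    simp [PySem.List.pyGetD_zero_cons]

-- ===== VERDICT (by name: the statement is the Claim_ definition above) =====
theorem spaniter_spec : Claim_equal_spaniter := by
  intro s d _
  unfold Spec_spaniter spaniter spaniter_alt
  rw [spanGo_eq]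
  cases hb : positerGo s d 0 (s.toList.length + 1) with
  | nil => simp [assembleSpans]
  | cons b bs =>
    simp only [if_neg (by simp : (b :: bs : List Int) ≠ [])]
    exact assembleA_eq (PySem.Str.len s) bs b 0
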